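-- pv_equiv track=rewrite | github.com/gglobster/trappist | backbonomist/libs/string_ops.py | multisplit_finder
-- ===== SOURCE A (Python) =====
-- def multisplit_finder(g_string, separator):
--     """Find multiple split coordinates."""
--     origin = 0
--     coord = 0
--     coord_pairs = []
--     while coord < len(g_string):
--         coord = g_string.find(separator, origin)
--         if coord is -1:
--             coord = len(g_string)
--         coord_pairs.append((origin, coord))
--         origin = coord + len(separator)
--     return coord_pairs
-- ===== SOURCE B (Python) =====
-- def multisplit_finder(g_string, separator):
--     """Find multiple split coordinates."""
--     if not g_string:
--         return []
--     coord_pairs = []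
--     pos = 0
--     for segment in g_string.split(separator):
--         end = pos + len(segment)
--         coord_pairs.append((pos, end))
--         pos = end + len(separator)
--     return coord_pairs
-- ===== Notes on version B (the rewrite author's own statement) =====
-- stated objective: idiomatic
-- what changed: A locates each separator occurrence itself with an advancing str.find while-loop and appends (origin, coord) pairs as it goes; B instead delegates the matching to str.split and reconstructs the coordinate pairs from the segment lengths by a running prefix-sum.
import Mathlib
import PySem

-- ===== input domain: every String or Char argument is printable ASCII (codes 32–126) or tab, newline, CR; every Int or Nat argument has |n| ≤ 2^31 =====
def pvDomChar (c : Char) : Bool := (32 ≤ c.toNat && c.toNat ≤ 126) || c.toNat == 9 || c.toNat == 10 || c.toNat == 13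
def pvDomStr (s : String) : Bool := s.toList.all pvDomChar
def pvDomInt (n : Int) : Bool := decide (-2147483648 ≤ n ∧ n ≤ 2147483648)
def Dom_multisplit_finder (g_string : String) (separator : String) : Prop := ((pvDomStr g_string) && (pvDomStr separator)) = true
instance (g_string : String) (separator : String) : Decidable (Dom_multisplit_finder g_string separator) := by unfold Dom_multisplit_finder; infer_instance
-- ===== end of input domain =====

-- B replaces A's advancing str.find while-loop by str.split plus a prefix-sum over
-- segment lengths (alternative decomposition, same cost); Pre_ excludes the empty
-- separator with nonempty input, where Python A loops forever (and B raises ValueError).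


-- ===== PORT A =====
-- A's while-loop; the fuel only makes the recursion total (inside Pre_,
-- g.length + 2 iterations always suffice, proved in the lemmas below).
def pvLoopA (g sep : List Char) : Nat → Int → Int → List (Int × Int) → List (Int × Int)
  | 0, _, _, acc => acc
  | fuel + 1, origin, coord, acc =>
    if coord < (g.length : Int) then
      let c0 := PySem.Chars.findFrom g sep origin none
      let c := if c0 = -1 then (g.length : Int) else c0
      pvLoopA g sep fuel (c + sep.length) c (acc ++ [(origin, c)])
    else acc

def multisplit_finder (g_string : String) (separator : String) : List (Int × Int) :=
  pvLoopA g_string.toList separator.toList (g_string.toList.length + 2) 0 0 []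

-- ===== PORT B =====
-- Source B: early return on empty g_string, then a single for-loop over
-- g_string.split(separator) carrying (coord_pairs, pos); ported as a foldl over
-- PySem.Chars.splitOn (= str.split for sep ≠ "", the only case Pre_ admits).
def multisplit_finder_alt (g_string : String) (separator : String) : List (Int × Int) :=
  let g := g_string.toList
  if g = [] then []
  else
    let L : Int := (separator.toList.length : Int)
    ((PySem.Chars.splitOn g separator.toList).foldl
      (fun st seg =>
        let e : Int := st.2 + (seg.length : Int)
        (st.1 ++ [(st.2, e)], e + L))
      ([], (0 : Int))).1

-- ===== PRECONDITION & SPEC =====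
-- Pre_ excludes only the empty separator with nonempty g_string: there Python A
-- never terminates (str.find('') advances origin past every coordinate check too
-- slowly) and B's str.split raises ValueError, so A returns on no excluded input.
def Pre_multisplit_finder (g_string : String) (separator : String) : Prop :=
  separator ≠ "" ∨ g_string = ""
instance (g_string : String) (separator : String) : Decidable (Pre_multisplit_finder g_string separator) := by unfold Pre_multisplit_finder; infer_instance

def pvWitness_multisplit_finder : String × String := ("a,b,,c", ",")

def Spec_multisplit_finder (g_string : String) (separator : String) (out : List (Int × Int)) : Prop := out = multisplit_finder_alt g_string separator
instance (g_string : String) (separator : String) (out : List (Int × Int)) : Decidable (Spec_multisplit_finder g_string separator out) := by unfold Spec_multisplit_finder; infer_instance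

-- ===== CLAIM (what is proved, stated in full; the proofs are below) =====
def Claim_equal_multisplit_finder : Prop := ∀ (g_string : String) (separator : String), Dom_multisplit_finder g_string separator → Pre_multisplit_finder g_string separator → Spec_multisplit_finder g_string separator (multisplit_finder g_string separator)

-- ===== LEMMAS AND PROOFS =====

-- Reference recursion both sides are reduced to: the coordinate pairs by repeated
-- first-occurrence search in the remaining suffix (fueled; fuel-insensitive once
-- fuel > length, lemma pvR_fuel below).
def pvR (sep : List Char) : Nat → List Char → Int → List (Int × Int)
  | 0, _, _ => []
  | fuel + 1, l, pos =>
    let f := PySem.Chars.find l sep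
    if f = -1 then [(pos, pos + (l.length : Int))]
    else (pos, pos + f) :: pvR sep fuel (l.drop (f.toNat + sep.length)) (pos + f + sep.length)

lemma pv_find_pos_facts (l sep : List Char)
    (h : PySem.Chars.find l sep ≠ -1) :
    0 ≤ PySem.Chars.find l sep ∧
    (PySem.Chars.find l sep).toNat + sep.length ≤ l.length ∧
    sep <+: l.drop (PySem.Chars.find l sep).toNat ∧
    (∀ i < (PySem.Chars.find l sep).toNat, ¬ sep <+: l.drop i) := by
  have h0 : 0 ≤ PySem.Chars.find l sep := by
    have := PySem.Chars.neg_one_le_find l sep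
    omega
  obtain ⟨hpre, hmin⟩ := PySem.Chars.find_spec h0
  refine ⟨h0, ?_, hpre, hmin⟩
  have := hpre.length_le
  rw [List.length_drop] at this
  have hle : PySem.Chars.find l sep ≤ (l.length : Int) := PySem.Chars.find_le_length l sep
  have hlt : (PySem.Chars.find l sep).toNat ≤ l.length := by omega
  omega

lemma pvR_fuel (sep : List Char) (hsep : sep ≠ []) :
    ∀ (f1 : Nat) (f2 : Nat) (l : List Char) (pos : Int), l.length < f1 → l.length < f2 →
      pvR sep f1 l pos = pvR sep f2 l pos := by
  intro f1
  induction f1 with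
  | zero => intro f2 l pos h1 _; omega
  | succ n ih =>
    intro f2 l pos h1 h2
    cases f2 with
    | zero => omega
    | succ m =>
      by_cases hf : PySem.Chars.find l sep = -1
      · simp [pvR, hf]
      · obtain ⟨h0, hlen, -, -⟩ := pv_find_pos_facts l sep hf
        have hsl : 1 ≤ sep.length := List.length_pos_iff.mpr hsep
        have hd : (l.drop ((PySem.Chars.find l sep).toNat + sep.length)).length
            = l.length - ((PySem.Chars.find l sep).toNat + sep.length) := List.length_drop
        simp only [pvR, hf, reduceIte]
        rw [ih m _ _ (by omega) (by omega)]

-- ---------- A-side: the while-loop computes pvR on the remaining suffix ----------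
lemma pvLoopA_stop (g sep : List Char) (fuel : Nat) (origin coord : Int)
    (acc : List (Int × Int)) (h : ¬ coord < (g.length : Int)) :
    pvLoopA g sep fuel origin coord acc = acc := by
  cases fuel with
  | zero => rfl
  | succ n => simp [pvLoopA, h]

lemma pvLoopA_eq_pvR (g sep : List Char) (hsep : sep ≠ []) :
    ∀ (fuel : Nat) (k : Nat) (coord : Int) (acc : List (Int × Int)),
      k ≤ g.length → g.length - k < fuel → coord < (g.length : Int) →
      pvLoopA g sep fuel (k : Int) coord acc
        = acc ++ pvR sep ((g.drop k).length + 1) (g.drop k) (k : Int) := by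
  intro fuel
  induction fuel with
  | zero => intro k coord acc hk hf hc; omega
  | succ n ih =>
    intro k coord acc hk hf hc
    have hff : PySem.Chars.findFrom g sep (k : Int) none
        = if PySem.Chars.find (g.drop k) sep = -1 then -1
          else (k : Int) + PySem.Chars.find (g.drop k) sep :=
      PySem.Chars.findFrom_natCast g sep k hk
    by_cases hfind : PySem.Chars.find (g.drop k) sep = -1
    · have hp : PySem.Chars.findFrom g sep (k : Int) none = -1 := by rw [hff, if_pos hfind]
      rw [show pvLoopA g sep (n+1) (k : Int) coord acc
            = pvLoopA g sep n ((g.length : Int) + sep.length) (g.length : Int)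
                (acc ++ [((k : Int), (g.length : Int))]) from by
          simp [pvLoopA, if_pos hc, hp]]
      rw [pvLoopA_stop _ _ _ _ _ _ (lt_irrefl _)]
      simp [pvR, hfind]
      omega
    · set p := PySem.Chars.find (g.drop k) sep with hpdef
      obtain ⟨h0, hlen, -, -⟩ := pv_find_pos_facts (g.drop k) sep hfind
      have hdl : (g.drop k).length = g.length - k := List.length_drop
      have hsl : 1 ≤ sep.length := List.length_pos_iff.mpr hsep
      have hp : PySem.Chars.findFrom g sep (k : Int) none = (k : Int) + p := by
        rw [hff, if_neg hfind]
      have hpne : (k : Int) + p ≠ -1 := by omega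
      have hclt : (k : Int) + p < (g.length : Int) := by omega
      have hknew : ((k + p.toNat + sep.length : Nat) : Int) = (k : Int) + p + sep.length := by
        push_cast; omega
      rw [show pvLoopA g sep (n+1) (k : Int) coord acc
            = pvLoopA g sep n (((k + p.toNat + sep.length : Nat) : Int)) ((k : Int) + p)
                (acc ++ [((k : Int), (k : Int) + p)]) from by
          simp only [pvLoopA, if_pos hc, hp, if_neg hpne]
          rw [hknew]]
      rw [ih (k + p.toNat + sep.length) ((k : Int) + p) _ (by omega) (by omega) hclt]
      have hdrop : g.drop (k + p.toNat + sep.length) = (g.drop k).drop (p.toNat + sep.length) := by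
        rw [List.drop_drop]; ring_nf
      have hfr : pvR sep ((g.drop k).length + 1) (g.drop k) (k : Int)
          = ((k : Int), (k : Int) + p)
            :: pvR sep ((g.drop (k + p.toNat + sep.length)).length + 1)
                 (g.drop (k + p.toNat + sep.length)) ((k : Int) + p + sep.length) := by
        rw [show pvR sep ((g.drop k).length + 1) (g.drop k) (k : Int)
              = ((k : Int), (k : Int) + p)
                :: pvR sep ((g.drop k).length) ((g.drop k).drop (p.toNat + sep.length))
                     ((k : Int) + p + sep.length) from by
            simp [pvR, ← hpdef, hfind]]
        rw [hdrop]
        congr 1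
        have hdl2 : ((g.drop k).drop (p.toNat + sep.length)).length
            = (g.drop k).length - (p.toNat + sep.length) := List.length_drop
        exact pvR_fuel sep hsep _ _ _ _ (by omega) (by omega)
      rw [hfr, hknew]
      simp

-- ---------- B-side: splitOn characterised by first occurrences ----------
-- fueled find-based splitter mirroring str.split's output
def pvSplitF (sep : List Char) : Nat → List Char → List (List Char)
  | 0, _ => []
  | fuel + 1, l =>
    let f := PySem.Chars.find l sep
    if f = -1 then [l]
    else l.take f.toNat :: pvSplitF sep fuel (l.drop (f.toNat + sep.length))

lemma pvSplitF_fuel (sep : List Char) (hsep : sep ≠ []) :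
    ∀ (f1 : Nat) (f2 : Nat) (l : List Char), l.length < f1 → l.length < f2 →
      pvSplitF sep f1 l = pvSplitF sep f2 l := by
  intro f1
  induction f1 with
  | zero => intro f2 l h1 _; omega
  | succ n ih =>
    intro f2 l h1 h2
    cases f2 with
    | zero => omega
    | succ m =>
      by_cases hf : PySem.Chars.find l sep = -1
      · simp [pvSplitF, hf]
      · obtain ⟨h0, hlen, -, -⟩ := pv_find_pos_facts l sep hf
        have hsl : 1 ≤ sep.length := List.length_pos_iff.mpr hsep
        have hd : (l.drop ((PySem.Chars.find l sep).toNat + sep.length)).length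
            = l.length - ((PySem.Chars.find l sep).toNat + sep.length) := List.length_drop
        simp only [pvSplitF, hf, reduceIte]
        rw [ih m _ (by omega) (by omega)]

-- go over a suffix containing no occurrence: consumes everything into cur
lemma pv_go_miss (sep : List Char) :
    ∀ (l cur : List Char) (fuel : Nat) (acc : List (List Char)),
      (∀ i, ¬ sep <+: l.drop i) → l.length < fuel →
      PySem.Chars.splitOn.go sep fuel l cur acc = ((cur.reverse ++ l) :: acc).reverse := by
  intro l
  induction l with
  | nil =>
    intro cur fuel acc _ hf
    cases fuel with
    | zero => omega
    | succ n => rw [PySem.Chars.splitOn.go] <;> simp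
  | cons c rest ih =>
    intro cur fuel acc hno hf
    cases fuel with
    | zero => simp at hf
    | succ n =>
      have h0 : ¬ sep.isPrefixOf (c :: rest) := by
        rw [List.isPrefixOf_iff_prefix]
        exact hno 0
      rw [PySem.Chars.splitOn.go, if_neg h0]
      rw [ih (c :: cur) n acc (fun i => by simpa using hno (i + 1)) (by simpa using hf)]
      simp

-- go across the first occurrence at position p: emits one segment, resets cur
lemma pv_go_hit (sep : List Char) (hsep : sep ≠ []) :
    ∀ (p : Nat) (l cur : List Char) (fuel : Nat) (acc : List (List Char)),
      sep <+: l.drop p → (∀ i < p, ¬ sep <+: l.drop i) → p ≤ l.length → l.length < fuel →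
      PySem.Chars.splitOn.go sep fuel l cur acc
        = PySem.Chars.splitOn.go sep (fuel - (p + 1)) (l.drop (p + sep.length)) []
            ((cur.reverse ++ l.take p) :: acc) := by
  intro p
  induction p with
  | zero =>
    intro l cur fuel acc hpre _ _ hf
    have hl : l ≠ [] := by
      intro h
      subst h
      simp at hpre
      exact hsep hpre
    obtain ⟨c, rest, rfl⟩ := List.exists_cons_of_ne_nil hl
    cases fuel with
    | zero => simp at hf
    | succ n =>
      have h0 : sep.isPrefixOf (c :: rest) := by
        rw [List.isPrefixOf_iff_prefix]; simpa using hpre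
      rw [PySem.Chars.splitOn.go, if_pos h0]
      simp
  | succ p ih =>
    intro l cur fuel acc hpre hmin hlen hf
    have hl : l ≠ [] := by intro h; subst h; simp at hlen
    obtain ⟨c, rest, rfl⟩ := List.exists_cons_of_ne_nil hl
    cases fuel with
    | zero => simp at hf
    | succ n =>
      have h0 : ¬ sep.isPrefixOf (c :: rest) := by
        rw [List.isPrefixOf_iff_prefix]
        exact hmin 0 (Nat.succ_pos p)
      rw [PySem.Chars.splitOn.go, if_neg h0]
      rw [ih rest (c :: cur) n acc (by simpa using hpre)
            (fun i hi => by simpa using hmin (i + 1) (by omega))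
            (by simpa using hlen) (by simpa using hf)]
      have e1 : (c :: rest).drop (p + 1 + sep.length) = rest.drop (p + sep.length) := by
        rw [show p + 1 + sep.length = (p + sep.length) + 1 from by omega, List.drop_succ_cons]
      have e2 : n + 1 - (p + 1 + 1) = n - (p + 1) := by omega
      rw [e1, e2]
      simp [List.take_succ_cons]

-- go with empty cur computes pvSplitF
lemma pv_go_eq_pvSplitF (sep : List Char) (hsep : sep ≠ []) :
    ∀ (fuel : Nat) (l : List Char) (acc : List (List Char)), l.length < fuel →
      PySem.Chars.splitOn.go sep fuel l [] acc = acc.reverse ++ pvSplitF sep fuel l := by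
  intro fuel
  induction fuel using Nat.strong_induction_on with
  | _ n ihs =>
    intro l acc hf
    cases n with
    | zero => omega
    | succ m =>
      by_cases hfind : PySem.Chars.find l sep = -1
      · have hno : ∀ i, ¬ sep <+: l.drop i := by
          intro i hpre
          rw [PySem.Chars.find_eq_neg_one_iff] at hfind
          exact hfind ((hpre.isInfix).trans (List.drop_suffix i l).isInfix)
        rw [pv_go_miss sep l [] (m+1) acc hno hf]
        simp [pvSplitF, hfind]
      · obtain ⟨h0, hlen, hpre, hmin⟩ := pv_find_pos_facts l sep hfind
        set p := (PySem.Chars.find l sep).toNat with hpdef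
        have hsl : 1 ≤ sep.length := List.length_pos_iff.mpr hsep
        have hd : (l.drop (p + sep.length)).length = l.length - (p + sep.length) :=
          List.length_drop
        rw [pv_go_hit sep hsep p l [] (m+1) acc hpre hmin (by omega) hf]
        rw [ihs (m + 1 - (p + 1)) (by omega) (l.drop (p + sep.length)) _ (by omega)]
        have hsplit : pvSplitF sep (m + 1) l
            = l.take p :: pvSplitF sep m (l.drop (p + sep.length)) := by
          simp [pvSplitF, hfind, ← hpdef]
        rw [hsplit]
        have hfuel : pvSplitF sep (m + 1 - (p + 1)) (l.drop (p + sep.length))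
            = pvSplitF sep m (l.drop (p + sep.length)) := by
          exact pvSplitF_fuel sep hsep _ _ _ (by omega) (by omega)
        rw [hfuel]
        simp

lemma pv_splitOn_eq (l sep : List Char) (hsep : sep ≠ []) :
    PySem.Chars.splitOn l sep = pvSplitF sep (l.length + 1) l := by
  rw [show PySem.Chars.splitOn l sep = PySem.Chars.splitOn.go sep (l.length + 1) l [] [] from rfl]
  rw [pv_go_eq_pvSplitF sep hsep (l.length + 1) l [] (by omega)]
  simp

-- the fold over the segment list computes pvR
lemma pv_fold_eq_pvR (sep : List Char) (L : Int) (hL : L = (sep.length : Int)) (hsep : sep ≠ []) :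
    ∀ (fuel : Nat) (l : List Char) (pos : Int) (acc : List (Int × Int)), l.length < fuel →
      ((pvSplitF sep fuel l).foldl
        (fun st seg =>
          let e : Int := st.2 + (seg.length : Int)
          (st.1 ++ [(st.2, e)], e + L)) (acc, pos)).1
        = acc ++ pvR sep fuel l pos := by
  intro fuel
  induction fuel with
  | zero => intro l pos acc h; omega
  | succ n ih =>
    intro l pos acc hf
    by_cases hfind : PySem.Chars.find l sep = -1
    · simp [pvSplitF, pvR, hfind]
    · obtain ⟨h0, hlen, -, -⟩ := pv_find_pos_facts l sep hfind
      set p := (PySem.Chars.find l sep).toNat with hpdef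
      have hsl : 1 ≤ sep.length := List.length_pos_iff.mpr hsep
      have htake : ((l.take p).length : Int) = PySem.Chars.find l sep := by
        rw [List.length_take]
        omega
      have hd : (l.drop (p + sep.length)).length = l.length - (p + sep.length) := List.length_drop
      simp only [pvSplitF, pvR, hfind, reduceIte, ← hpdef, List.foldl_cons]
      rw [ih (l.drop (p + sep.length)) _ _ (by omega)]
      rw [htake, hL]
      simp

lemma pv_toList_eq_nil_iff (s : String) : s.toList = [] ↔ s = "" := by
  constructor
  · intro h
    have := congrArg String.ofList h
    simpa using this
  · intro h; simp [h]

theorem multisplit_finder_eq (g_string separator : String)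
    (hpre : Pre_multisplit_finder g_string separator) :
    multisplit_finder g_string separator = multisplit_finder_alt g_string separator := by
  unfold multisplit_finder multisplit_finder_alt
  by_cases hg : g_string.toList = []
  · rw [pvLoopA_stop]
    · simp [hg]
    · simp [hg]
  · have hsep : separator.toList ≠ [] := by
      rcases hpre with h | h
      · intro hc; exact h ((pv_toList_eq_nil_iff separator).mp hc)
      · exact absurd (by simp [h] : g_string.toList = []) hg
    have hlen : 1 ≤ g_string.toList.length := by
      cases h : g_string.toList with
      | nil => exact absurd h hg
      | cons a t => simp
    have hA := pvLoopA_eq_pvR g_string.toList separator.toList hsep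
        (g_string.toList.length + 2) 0 0 [] (Nat.zero_le _) (by omega) (by omega)
    simp only [Nat.cast_zero, List.nil_append, List.drop_zero] at hA
    rw [if_neg hg, hA]
    rw [pv_splitOn_eq g_string.toList separator.toList hsep]
    rw [pv_fold_eq_pvR separator.toList _ rfl hsep (g_string.toList.length + 1)
        g_string.toList 0 [] (by omega)]
    simp

-- ===== VERDICT (by name: the statement is the Claim_ definition above) =====
theorem multisplit_finder_spec : Claim_equal_multisplit_finder := by
  intro g_string separator _ hpre
  exact multisplit_finder_eq g_string separator hpre
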